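-- pv_equiv track=rewrite | github.com/johntordj241/ProbaEdge | utils/dashboard.py | _stat_label_variants
-- ===== SOURCE A (Python) =====
-- from typing import Any, Dict, List, Optional, Tuple
--
-- def _normalize_stat_label(raw: Any) -> str:
--     import unicodedata
--
--     text = unicodedata.normalize("NFKD", str(raw or "").strip())
--     ascii_text = "".join(ch for ch in text if ord(ch) < 128)
--     return "".join(ch for ch in ascii_text.lower() if ch.isalnum())
--
-- STAT_LABEL_ALIASES: Dict[str, set[str]] = {
--     "shotsongoal": {"shotsongoal", "shotsontarget", "tirscadres", "tirscadre", "shotsatgoal"},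
--     "totalshots": {"totalshots", "tirstotaux", "shotstotal"},
--     "ballpossession": {"ballpossession", "possession", "possessiondeballe"},
--     "expectedgoals": {"expectedgoals", "xg", "butsattendus"},
--     "cornerkicks": {"cornerkicks", "corners"},
-- }
--
-- def _stat_label_variants(label: str) -> set[str]:
--     normalized = _normalize_stat_label(label)
--     variants = {normalized}
--     for key, entries in STAT_LABEL_ALIASES.items():
--         if normalized == key or normalized in entries:
--             variants.update({key, *entries})
--             break
--     return variants
-- ===== SOURCE B (Python) =====
-- from typing import Any, Dict
--
-- def _normalize_stat_label(raw: Any) -> str: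
--     import unicodedata
--
--     text = unicodedata.normalize("NFKD", str(raw or "").strip())
--     ascii_text = "".join(ch for ch in text if ord(ch) < 128)
--     return "".join(ch for ch in ascii_text.lower() if ch.isalnum())
--
-- STAT_LABEL_ALIASES: Dict[str, set[str]] = {
--     "shotsongoal": {"shotsongoal", "shotsontarget", "tirscadres", "tirscadre", "shotsatgoal"},
--     "totalshots": {"totalshots", "tirstotaux", "shotstotal"},
--     "ballpossession": {"ballpossession", "possession", "possessiondeballe"},
--     "expectedgoals": {"expectedgoals", "xg", "butsattendus"},
--     "cornerkicks": {"cornerkicks", "corners"},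
-- }
--
-- # Inverted index, built once: every key and alias points at its full variant set.
-- _VARIANT_INDEX: Dict[str, frozenset] = {}
-- for _key, _entries in STAT_LABEL_ALIASES.items():
--     _full = frozenset({_key, *_entries})
--     for _s in _full:
--         _VARIANT_INDEX[_s] = _full
--
-- def _stat_label_variants(label: str) -> set[str]:
--     normalized = _normalize_stat_label(label)
--     return {normalized, *_VARIANT_INDEX.get(normalized, ())}
-- ===== Notes on version B (the rewrite author's own statement) =====
-- stated objective: simpler
-- what changed: Replaces the scan over STAT_LABEL_ALIASES with membership tests per group by a module-level inverted index built once (every key/alias maps to its full variant set); the function body becomes normalize + one dict lookup.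
import Mathlib
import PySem

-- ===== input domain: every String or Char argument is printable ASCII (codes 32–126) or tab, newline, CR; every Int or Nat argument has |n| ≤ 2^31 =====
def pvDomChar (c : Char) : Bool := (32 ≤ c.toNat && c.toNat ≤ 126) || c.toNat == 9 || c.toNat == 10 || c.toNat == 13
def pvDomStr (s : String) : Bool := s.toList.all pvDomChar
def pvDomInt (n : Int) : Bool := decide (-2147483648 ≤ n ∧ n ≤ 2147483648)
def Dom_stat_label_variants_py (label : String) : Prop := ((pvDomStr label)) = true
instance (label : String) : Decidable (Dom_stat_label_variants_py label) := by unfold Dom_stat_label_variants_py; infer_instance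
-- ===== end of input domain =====

-- B replaces A's scan over the alias groups by a prebuilt inverted index (one dict lookup); simpler per-call body.
-- Python returns a set; the set-valued result is order-insensitive, the ports fix the written literal order.

-- ===== PORT A =====
-- _normalize_stat_label: 'label or ""' is 'label' for strings ('' or '' == ''); NFKD and the
-- ord<128 filter are the identity on the printable-ASCII domain but the filter is ported literally.
def pvNormalize (label : String) : String :=
  let text := PySem.Str.strip label
  let asciiText := String.mk (text.toList.filter (fun ch => ch.toNat < 128))
  String.mk ((PySem.Str.lower asciiText).toList.filter PySem.Chars.isalnum)

def pvAliases : List (String × List String) :=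
  [ ("shotsongoal", ["shotsongoal", "shotsontarget", "tirscadres", "tirscadre", "shotsatgoal"]),
    ("totalshots", ["totalshots", "tirstotaux", "shotstotal"]),
    ("ballpossession", ["ballpossession", "possession", "possessiondeballe"]),
    ("expectedgoals", ["expectedgoals", "xg", "butsattendus"]),
    ("cornerkicks", ["cornerkicks", "corners"]) ]

-- the for-loop with break: first matching group updates the variants set and stops
def pvLoop (normalized : String) : List (String × List String) → PySem.Set String → PySem.Set String
  | [], variants => variants
  | (key, entries) :: rest, variants =>
    if normalized == key || entries.contains normalized then
      PySem.Set.update variants (key :: entries)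
    else pvLoop normalized rest variants

def stat_label_variants_py (label : String) : List String :=
  let normalized := pvNormalize label
  pvLoop normalized pvAliases (PySem.Set.ofList [normalized])

-- ===== PORT B =====
-- the module-level inverted index, built once by the module-top loop of Source B
def pvIndex : PySem.Dict String (List String) :=
  pvAliases.foldl
    (fun d p =>
      let full := PySem.Set.ofList (p.1 :: p.2)
      full.foldl (fun d s => d.insert s full) d)
    PySem.Dict.empty

def stat_label_variants_py_alt (label : String) : List String :=
  let normalized := pvNormalize label
  PySem.Set.update (PySem.Set.ofList [normalized]) (PySem.Dict.getD pvIndex normalized [])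

-- ===== PRECONDITION & SPEC =====
def Spec_stat_label_variants_py (label : String) (out : List String) : Prop := out = stat_label_variants_py_alt label
instance (label : String) (out : List String) : Decidable (Spec_stat_label_variants_py label out) := by unfold Spec_stat_label_variants_py; infer_instance

-- ===== CLAIM (what is proved, stated in full; the proofs are below) =====
def Claim_equal_stat_label_variants_py : Prop := ∀ (label : String), Dom_stat_label_variants_py label → Spec_stat_label_variants_py label (stat_label_variants_py label)

-- ===== LEMMAS AND PROOFS =====

-- the heart of the equivalence: for every normalized string, A's first-match scan
-- equals a lookup in the prebuilt inverted index
-- the heart of the equivalence: for every normalized string, A's first-match scan over the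
-- alias groups equals one lookup in the prebuilt inverted index
theorem pvLoop_eq_index (n : String) :
    pvLoop n pvAliases (PySem.Set.ofList [n]) =
      PySem.Set.update (PySem.Set.ofList [n]) (PySem.Dict.getD pvIndex n []) := by
  by_cases h1 : n = "shotsongoal"
  · subst h1
    simp [pvLoop, pvAliases, pvIndex, PySem.Dict.getD, PySem.Dict.get?, PySem.Dict.insert,
          PySem.Dict.empty, PySem.Set.update, PySem.Set.ofList, PySem.Set.add, List.contains,
          PySem.Set.contains, List.elem]
  by_cases h2 : n = "shotsontarget"
  · subst h2
    simp [pvLoop, pvAliases, pvIndex, PySem.Dict.getD, PySem.Dict.get?, PySem.Dict.insert,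
          PySem.Dict.empty, PySem.Set.update, PySem.Set.ofList, PySem.Set.add, List.contains,
          PySem.Set.contains, List.elem]
  by_cases h3 : n = "tirscadres"
  · subst h3
    simp [pvLoop, pvAliases, pvIndex, PySem.Dict.getD, PySem.Dict.get?, PySem.Dict.insert,
          PySem.Dict.empty, PySem.Set.update, PySem.Set.ofList, PySem.Set.add, List.contains,
          PySem.Set.contains, List.elem]
  by_cases h4 : n = "tirscadre"
  · subst h4
    simp [pvLoop, pvAliases, pvIndex, PySem.Dict.getD, PySem.Dict.get?, PySem.Dict.insert,
          PySem.Dict.empty, PySem.Set.update, PySem.Set.ofList, PySem.Set.add, List.contains,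
          PySem.Set.contains, List.elem]
  by_cases h5 : n = "shotsatgoal"
  · subst h5
    simp [pvLoop, pvAliases, pvIndex, PySem.Dict.getD, PySem.Dict.get?, PySem.Dict.insert,
          PySem.Dict.empty, PySem.Set.update, PySem.Set.ofList, PySem.Set.add, List.contains,
          PySem.Set.contains, List.elem]
  by_cases h6 : n = "totalshots"
  · subst h6
    simp [pvLoop, pvAliases, pvIndex, PySem.Dict.getD, PySem.Dict.get?, PySem.Dict.insert,
          PySem.Dict.empty, PySem.Set.update, PySem.Set.ofList, PySem.Set.add, List.contains,
          PySem.Set.contains, List.elem]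
  by_cases h7 : n = "tirstotaux"
  · subst h7
    simp [pvLoop, pvAliases, pvIndex, PySem.Dict.getD, PySem.Dict.get?, PySem.Dict.insert,
          PySem.Dict.empty, PySem.Set.update, PySem.Set.ofList, PySem.Set.add, List.contains,
          PySem.Set.contains, List.elem]
  by_cases h8 : n = "shotstotal"
  · subst h8
    simp [pvLoop, pvAliases, pvIndex, PySem.Dict.getD, PySem.Dict.get?, PySem.Dict.insert,
          PySem.Dict.empty, PySem.Set.update, PySem.Set.ofList, PySem.Set.add, List.contains,
          PySem.Set.contains, List.elem]
  by_cases h9 : n = "ballpossession"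
  · subst h9
    simp [pvLoop, pvAliases, pvIndex, PySem.Dict.getD, PySem.Dict.get?, PySem.Dict.insert,
          PySem.Dict.empty, PySem.Set.update, PySem.Set.ofList, PySem.Set.add, List.contains,
          PySem.Set.contains, List.elem]
  by_cases h10 : n = "possession"
  · subst h10
    simp [pvLoop, pvAliases, pvIndex, PySem.Dict.getD, PySem.Dict.get?, PySem.Dict.insert,
          PySem.Dict.empty, PySem.Set.update, PySem.Set.ofList, PySem.Set.add, List.contains,
          PySem.Set.contains, List.elem]
  by_cases h11 : n = "possessiondeballe"
  · subst h11
    simp [pvLoop, pvAliases, pvIndex, PySem.Dict.getD, PySem.Dict.get?, PySem.Dict.insert,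
          PySem.Dict.empty, PySem.Set.update, PySem.Set.ofList, PySem.Set.add, List.contains,
          PySem.Set.contains, List.elem]
  by_cases h12 : n = "expectedgoals"
  · subst h12
    simp [pvLoop, pvAliases, pvIndex, PySem.Dict.getD, PySem.Dict.get?, PySem.Dict.insert,
          PySem.Dict.empty, PySem.Set.update, PySem.Set.ofList, PySem.Set.add, List.contains,
          PySem.Set.contains, List.elem]
  by_cases h13 : n = "xg"
  · subst h13
    simp [pvLoop, pvAliases, pvIndex, PySem.Dict.getD, PySem.Dict.get?, PySem.Dict.insert,
          PySem.Dict.empty, PySem.Set.update, PySem.Set.ofList, PySem.Set.add, List.contains,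
          PySem.Set.contains, List.elem]
  by_cases h14 : n = "butsattendus"
  · subst h14
    simp [pvLoop, pvAliases, pvIndex, PySem.Dict.getD, PySem.Dict.get?, PySem.Dict.insert,
          PySem.Dict.empty, PySem.Set.update, PySem.Set.ofList, PySem.Set.add, List.contains,
          PySem.Set.contains, List.elem]
  by_cases h15 : n = "cornerkicks"
  · subst h15
    simp [pvLoop, pvAliases, pvIndex, PySem.Dict.getD, PySem.Dict.get?, PySem.Dict.insert,
          PySem.Dict.empty, PySem.Set.update, PySem.Set.ofList, PySem.Set.add, List.contains,
          PySem.Set.contains, List.elem]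
  by_cases h16 : n = "corners"
  · subst h16
    simp [pvLoop, pvAliases, pvIndex, PySem.Dict.getD, PySem.Dict.get?, PySem.Dict.insert,
          PySem.Dict.empty, PySem.Set.update, PySem.Set.ofList, PySem.Set.add, List.contains,
          PySem.Set.contains, List.elem]
  -- n matches no key and no alias: both sides are the singleton set of n
  have hidx : pvIndex = PySem.Dict.mk
    [
      ("shotsongoal", ["shotsongoal", "shotsontarget", "tirscadres", "tirscadre", "shotsatgoal"]),
      ("shotsontarget", ["shotsongoal", "shotsontarget", "tirscadres", "tirscadre", "shotsatgoal"]),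
      ("tirscadres", ["shotsongoal", "shotsontarget", "tirscadres", "tirscadre", "shotsatgoal"]),
      ("tirscadre", ["shotsongoal", "shotsontarget", "tirscadres", "tirscadre", "shotsatgoal"]),
      ("shotsatgoal", ["shotsongoal", "shotsontarget", "tirscadres", "tirscadre", "shotsatgoal"]),
      ("totalshots", ["totalshots", "tirstotaux", "shotstotal"]),
      ("tirstotaux", ["totalshots", "tirstotaux", "shotstotal"]),
      ("shotstotal", ["totalshots", "tirstotaux", "shotstotal"]),
      ("ballpossession", ["ballpossession", "possession", "possessiondeballe"]),
      ("possession", ["ballpossession", "possession", "possessiondeballe"]),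
      ("possessiondeballe", ["ballpossession", "possession", "possessiondeballe"]),
      ("expectedgoals", ["expectedgoals", "xg", "butsattendus"]),
      ("xg", ["expectedgoals", "xg", "butsattendus"]),
      ("butsattendus", ["expectedgoals", "xg", "butsattendus"]),
      ("cornerkicks", ["cornerkicks", "corners"]),
      ("corners", ["cornerkicks", "corners"]) ] := by rfl
  rw [hidx]
  simp [pvLoop, pvAliases, PySem.Dict.getD, PySem.Dict.get?_mk_cons, PySem.Dict.get?,
        PySem.Set.update, h1, h2, h3, h4, h5, h6, h7, h8, h9, h10, h11, h12, h13, h14, h15, h16,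
        Ne.symm h1, Ne.symm h2, Ne.symm h3, Ne.symm h4, Ne.symm h5, Ne.symm h6, Ne.symm h7, Ne.symm h8, Ne.symm h9, Ne.symm h10, Ne.symm h11, Ne.symm h12, Ne.symm h13, Ne.symm h14, Ne.symm h15, Ne.symm h16]

-- ===== VERDICT (by name: the statement is the Claim_ definition above) =====
theorem stat_label_variants_py_spec : Claim_equal_stat_label_variants_py := by
  intro label _
  unfold Spec_stat_label_variants_py stat_label_variants_py stat_label_variants_py_alt
  exact pvLoop_eq_index (pvNormalize label)
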